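-- pv_equiv track=rewrite | github.com/tejassudsfp/ndna | genome/visualizer.py | get_band_labels
-- ===== SOURCE A (Python) =====
-- def get_band_labels(dims):
--     labels = []
--     for i, d in enumerate(dims):
--         if i == 0:
--             labels.append(f"input\n({d})")
--         elif i == len(dims) - 1:
--             labels.append(f"output\n({d})")
--         else:
--             labels.append(f"band {i}\n({d})")
--     return labels
-- ===== SOURCE B (Python) =====
-- def get_band_labels(dims):
--     if not dims:
--         return []
--     if len(dims) == 1:
--         return [f"input\n({dims[0]})"]
--     middle = [f"band {i}\n({d})" for i, d in enumerate(dims[1:-1], 1)]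
--     return [f"input\n({dims[0]})"] + middle + [f"output\n({dims[-1]})"]
-- ===== Notes on version B (the rewrite author's own statement) =====
-- stated objective: simpler
-- what changed: Instead of one loop over all indices with a three-way branch per element, B decomposes the list by shape (empty / singleton / longer): it slices out the interior dims[1:-1], labels only that slice, and concatenates [input] + interior bands + [output].
import Mathlib
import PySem

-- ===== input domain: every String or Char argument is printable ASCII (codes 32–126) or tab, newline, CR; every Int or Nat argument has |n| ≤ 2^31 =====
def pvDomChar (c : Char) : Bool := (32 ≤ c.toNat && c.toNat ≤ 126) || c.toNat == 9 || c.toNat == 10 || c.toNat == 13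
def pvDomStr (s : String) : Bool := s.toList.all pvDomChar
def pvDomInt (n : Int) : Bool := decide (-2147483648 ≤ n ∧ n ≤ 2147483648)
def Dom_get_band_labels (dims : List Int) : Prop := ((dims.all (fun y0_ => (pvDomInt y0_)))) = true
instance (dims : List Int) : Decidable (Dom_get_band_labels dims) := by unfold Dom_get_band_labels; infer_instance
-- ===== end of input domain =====

-- B is simpler: it decomposes the list by shape (empty / singleton / longer), labels only the
-- interior slice dims[1:-1], and concatenates [input] ++ interior bands ++ [output],
-- instead of A's single indexed loop with a three-way branch per element.

-- ===== PORT A =====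
def get_band_labels (dims : List Int) : List String :=
  (PySem.List.enumerate dims).foldl (fun labels p =>
    labels ++ [if p.1 = 0 then "input\n(" ++ PySem.Int.toStr p.2 ++ ")"
               else if p.1 = (dims.length : Int) - 1 then "output\n(" ++ PySem.Int.toStr p.2 ++ ")"
               else "band " ++ PySem.Int.toStr p.1 ++ "\n(" ++ PySem.Int.toStr p.2 ++ ")"]) []

-- ===== PORT B =====
def get_band_labels_alt (dims : List Int) : List String :=
  match dims with
  | [] => []
  | [d] => ["input\n(" ++ PySem.Int.toStr d ++ ")"]
  | d :: _ :: _ =>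
    let middle := (PySem.List.enumerate (PySem.List.slice dims (some 1) (some (-1))) 1).map
      (fun p => "band " ++ PySem.Int.toStr p.1 ++ "\n(" ++ PySem.Int.toStr p.2 ++ ")")
    ["input\n(" ++ PySem.Int.toStr d ++ ")"] ++ middle
      ++ ["output\n(" ++ PySem.Int.toStr dims.getLast! ++ ")"]

-- ===== PRECONDITION & SPEC =====
def Spec_get_band_labels (dims : List Int) (out : List String) : Prop := out = get_band_labels_alt dims
instance (dims : List Int) (out : List String) : Decidable (Spec_get_band_labels dims out) := by unfold Spec_get_band_labels; infer_instance

-- ===== CLAIM (what is proved, stated in full; the proofs are below) =====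
def Claim_equal_get_band_labels : Prop := ∀ (dims : List Int), Dom_get_band_labels dims → Spec_get_band_labels dims (get_band_labels dims)

-- ===== LEMMAS AND PROOFS =====

theorem get_band_labels_eq_map (dims : List Int) :
    get_band_labels dims = (PySem.List.enumerate dims).map
      (fun p => if p.1 = 0 then "input\n(" ++ PySem.Int.toStr p.2 ++ ")"
                else if p.1 = (dims.length : Int) - 1 then "output\n(" ++ PySem.Int.toStr p.2 ++ ")"
                else "band " ++ PySem.Int.toStr p.1 ++ "\n(" ++ PySem.Int.toStr p.2 ++ ")") := by
  simpa [get_band_labels] using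
    (PySem.List.foldl_append_singleton_eq_map (l := PySem.List.enumerate dims)
      (f := fun p => if p.1 = 0 then "input\n(" ++ PySem.Int.toStr p.2 ++ ")"
                else if p.1 = (dims.length : Int) - 1 then "output\n(" ++ PySem.Int.toStr p.2 ++ ")"
                else "band " ++ PySem.Int.toStr p.1 ++ "\n(" ++ PySem.Int.toStr p.2 ++ ")") (acc := []))

theorem slice_one_neg_one (x y : Int) (ys : List Int) :
    PySem.List.slice (x :: y :: ys) (some 1) (some (-1)) = (y :: ys).dropLast := by
  simp [PySem.List.slice, PySem.List.clampIdx, List.dropLast_eq_take]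
  have h : ¬ ((ys.length : Int) + 1 < 0) := by omega
  rw [if_neg h]
  omega

-- ===== VERDICT (by name: the statement is the Claim_ definition above) =====
theorem get_band_labels_spec : Claim_equal_get_band_labels := by
  intro dims _
  unfold Spec_get_band_labels
  rw [get_band_labels_eq_map]
  match dims with
  | [] => simp [get_band_labels_alt]
  | [d] => simp [get_band_labels_alt, PySem.List.enumerate]
  | x :: y :: ys =>
    unfold get_band_labels_alt
    rw [slice_one_neg_one]
    apply List.ext_getElem
    · simp [PySem.List.length_enumerate]
    · intro k h1 h2
      have hk : k < (x :: y :: ys).length := by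
        simpa [PySem.List.length_enumerate] using h1
      have hlenB : ((PySem.List.enumerate ((y :: ys).dropLast) 1).map
          (fun p => "band " ++ PySem.Int.toStr p.1 ++ "\n(" ++ PySem.Int.toStr p.2 ++ ")")).length
          = ys.length := by
        simp [PySem.List.length_enumerate]
      simp only [List.getElem_map, PySem.List.getElem_enumerate]
      match k, hk with
      | 0, _ => simp
      | (j+1), hk =>
        have hA0 : ((0 : Int) + ((j+1 : Nat) : Int)) ≠ 0 := by push_cast; omega
        rw [if_neg hA0]
        show _ = (("input\n(" ++ PySem.Int.toStr x ++ ")") :: _)[j+1]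
        simp only [List.getElem_cons_succ]
        simp only [List.append_eq, List.nil_append]
        rcases Nat.lt_or_ge j ys.length with hj | hj
        · have hA1 : ¬ ((0 : Int) + ((j+1 : Nat) : Int) = ((x :: y :: ys).length : Int) - 1) := by
            push_cast; simp; omega
          rw [if_neg hA1]
          rw [List.getElem_append_left (by simpa [hlenB] using hj)]
          simp only [List.getElem_map, PySem.List.getElem_enumerate, List.getElem_dropLast]
          have hc : ((0:Int) + ((j+1 : Nat) : Int)) = 1 + (j : Int) := by push_cast; ring
          rw [hc]
        · have hj' : j = ys.length := by
            have : j + 1 < ys.length + 2 := by simpa using hk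
            omega
          subst hj'
          have hA1 : ((0 : Int) + ((ys.length+1 : Nat) : Int) = ((x :: y :: ys).length : Int) - 1) := by
            push_cast; simp
          rw [if_pos hA1]
          rw [List.getElem_append_right (by simp [hlenB])]
          simp only [hlenB]
          simp [List.getLast!, List.getLast_eq_getElem]
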